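-- pv_equiv track=rewrite | github.com/M0hamedFawzy/ECG-Based-PhotoLock-HCI | Interface_/ecg_preprocessing.py | dynamic_segmentation
-- ===== SOURCE A (Python) =====
-- def dynamic_segmentation(ecg_signal, r_peaks, segment_length=2):
--     segments = []
--     current_segment = []
--
--     for r_peak_index in r_peaks:
--         current_segment.append(r_peak_index)
--
--         if len(current_segment) == (segment_length + 1):
--             segments.append(current_segment)
--             current_segment = []
--
--     # If there are remaining R-peaks not included in a segment
--     if current_segment:
--         segments.append(current_segment)
--
--     segmented_signal = []
--     for segment in segments:
--         start_index = segment[0]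
--         end_index = segment[-1]
--         segmented_signal.append(ecg_signal[start_index:end_index+1])
--
--     if len(r_peaks) % (segment_length + 1) != 0 :
--       segmented_signal = segmented_signal[:-1]
--
--     return segmented_signal
-- ===== SOURCE B (Python) =====
-- def dynamic_segmentation(ecg_signal, r_peaks, segment_length=2):
--     step = segment_length + 1
--     n = len(r_peaks) // step  # number of complete groups of step consecutive R-peaks
--     return [ecg_signal[r_peaks[i * step]: r_peaks[i * step + step - 1] + 1]
--             for i in range(n)]
-- ===== Notes on version B (the rewrite author's own statement) =====
-- stated objective: simpler
-- what changed: Replaces A's per-peak accumulator loop that builds groups, appends a trailing partial group and then conditionally trims it, by a single comprehension over the floor-division count of complete groups, slicing directly at strided indices r_peaks[i*step] .. r_peaks[i*step+step-1]; B touches each group once instead of each peak.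
-- outside the precondition, e.g. on dynamic_segmentation([5, 6, 7], [0, 2], -2): A returns [[5, 6, 7]], B returns []
import Mathlib
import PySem

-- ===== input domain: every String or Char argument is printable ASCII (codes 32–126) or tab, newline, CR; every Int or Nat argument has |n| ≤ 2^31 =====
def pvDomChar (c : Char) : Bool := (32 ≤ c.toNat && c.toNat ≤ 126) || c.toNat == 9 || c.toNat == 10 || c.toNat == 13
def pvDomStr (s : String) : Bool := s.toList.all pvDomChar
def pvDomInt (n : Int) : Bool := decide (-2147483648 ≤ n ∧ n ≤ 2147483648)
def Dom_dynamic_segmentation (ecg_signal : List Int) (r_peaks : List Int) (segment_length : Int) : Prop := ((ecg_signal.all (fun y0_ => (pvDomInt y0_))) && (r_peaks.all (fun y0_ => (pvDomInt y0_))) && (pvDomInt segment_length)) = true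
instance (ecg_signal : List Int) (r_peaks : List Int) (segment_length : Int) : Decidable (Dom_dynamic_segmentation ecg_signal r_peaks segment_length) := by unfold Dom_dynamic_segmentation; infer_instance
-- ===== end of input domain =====

-- B replaces A's group-accumulate / append-partial / trim pipeline by one map over the
-- floor-division count of complete groups, slicing at strided indices (objective: simpler).


-- ===== PORT A =====
-- the body of A's first for-loop (append to current_segment; close the group when it reaches segment_length+1)
def segStep (segment_length : Int) (st : List (List Int) × List Int) (r_peak_index : Int) : List (List Int) × List Int :=
  let cur := st.2 ++ [r_peak_index]
  if (cur.length : Int) = segment_length + 1 then (st.1 ++ [cur], []) else (st.1, cur)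

-- the body of A's second for-loop; segment[0] / segment[-1] ported with pyGetD (segments built by
-- the first loop are never empty, so the default is never read)
def sliceSeg (ecg_signal : List Int) (segment : List Int) : List Int :=
  let start_index := PySem.List.pyGetD segment 0 0
  let end_index := PySem.List.pyGetD segment (-1) 0
  PySem.List.slice ecg_signal (some start_index) (some (end_index + 1))

def dynamic_segmentation (ecg_signal : List Int) (r_peaks : List Int) (segment_length : Int) : List (List Int) :=
  let p := r_peaks.foldl (segStep segment_length) ([], [])
  let segments := if p.2 ≠ [] then p.1 ++ [p.2] else p.1
  let segmented_signal := segments.foldl (fun acc segment => acc ++ [sliceSeg ecg_signal segment]) []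
  if PySem.Int.mod (r_peaks.length : Int) (segment_length + 1) ≠ 0 then
    PySem.List.slice segmented_signal none (some (-1))
  else segmented_signal

-- ===== PORT B =====
def dynamic_segmentation_alt (ecg_signal : List Int) (r_peaks : List Int) (segment_length : Int) : List (List Int) :=
  let step := segment_length + 1
  let n := PySem.Int.floordiv (r_peaks.length : Int) step
  (PySem.List.pyRange 0 n 1).map (fun i =>
    PySem.List.slice ecg_signal (some (PySem.List.pyGetD r_peaks (i * step) 0))
      (some (PySem.List.pyGetD r_peaks (i * step + step - 1) 0 + 1)))

-- ===== PRECONDITION & SPEC =====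
-- Pre_ excludes segment_length = -1, where A raises ZeroDivisionError, and the meaningless negative
-- group sizes (segment_length < -1) on a nonempty r_peaks whose length segment_length+1 divides, where
-- A happens to return all peaks as one segment while B returns []; a negative segment length is outside
-- the function's natural domain, and everywhere else A = B is claimed and proved.
def Pre_dynamic_segmentation (ecg_signal : List Int) (r_peaks : List Int) (segment_length : Int) : Prop :=
  segment_length ≠ -1 ∧
    ¬ (segment_length < -1 ∧ r_peaks ≠ [] ∧ (segment_length + 1) ∣ (r_peaks.length : Int))
instance (ecg_signal : List Int) (r_peaks : List Int) (segment_length : Int) : Decidable (Pre_dynamic_segmentation ecg_signal r_peaks segment_length) := by unfold Pre_dynamic_segmentation; infer_instance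

def pvWitness_dynamic_segmentation : List Int × List Int × Int := ([5, 6, 7, 8, 9], [0, 2, 4], 2)

def Spec_dynamic_segmentation (ecg_signal : List Int) (r_peaks : List Int) (segment_length : Int) (out : List (List Int)) : Prop := out = dynamic_segmentation_alt ecg_signal r_peaks segment_length
instance (ecg_signal : List Int) (r_peaks : List Int) (segment_length : Int) (out : List (List Int)) : Decidable (Spec_dynamic_segmentation ecg_signal r_peaks segment_length out) := by unfold Spec_dynamic_segmentation; infer_instance

-- ===== CLAIM (what is proved, stated in full; the proofs are below) =====
def Claim_equal_dynamic_segmentation : Prop := ∀ (ecg_signal : List Int) (r_peaks : List Int) (segment_length : Int), Dom_dynamic_segmentation ecg_signal r_peaks segment_length → Pre_dynamic_segmentation ecg_signal r_peaks segment_length → Spec_dynamic_segmentation ecg_signal r_peaks segment_length (dynamic_segmentation ecg_signal r_peaks segment_length)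

-- ===== LEMMAS AND PROOFS =====

-- Throughout, sl is segment_length with 0 ≤ sl, and S = (sl+1).toNat ≥ 1 is the group size.

-- L0: a run too short to close a group just extends current_segment.
theorem segFold_short (sl : Int) (xs : List Int) : ∀ (segs : List (List Int)) (cur : List Int),
    (cur.length : Int) + xs.length < sl + 1 →
    xs.foldl (segStep sl) (segs, cur) = (segs, cur ++ xs) := by
  induction xs with
  | nil => intro segs cur _; simp
  | cons x t ih =>
    intro segs cur h
    simp only [List.foldl_cons, segStep]
    rw [if_neg (by simp at h ⊢; omega)]
    rw [ih segs (cur ++ [x]) (by simp at h ⊢; omega)]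
    simp

-- L1: the segments accumulator is only appended to.
theorem segFold_acc (sl : Int) (xs : List Int) : ∀ (segs : List (List Int)) (cur : List Int),
    xs.foldl (segStep sl) (segs, cur)
      = (segs ++ (xs.foldl (segStep sl) ([], cur)).1, (xs.foldl (segStep sl) ([], cur)).2) := by
  induction xs with
  | nil => intro segs cur; simp
  | cons x t ih =>
    intro segs cur
    simp only [List.foldl_cons, segStep]
    by_cases h : ((cur ++ [x]).length : Int) = sl + 1
    · rw [if_pos h, if_pos h]
      simp only [List.nil_append]
      rw [ih (segs ++ [cur ++ [x]]) [], ih [cur ++ [x]] []]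
      simp
    · rw [if_neg h, if_neg h]
      exact ih segs (cur ++ [x])

-- L2: a full group closes: processing ys with cur.length + ys.length = sl+1 flushes cur ++ ys.
theorem segFold_close (sl : Int) (ys : List Int) : ∀ (xs : List Int) (segs : List (List Int)) (cur : List Int),
    ys ≠ [] → (cur.length : Int) + ys.length = sl + 1 →
    (ys ++ xs).foldl (segStep sl) (segs, cur) = xs.foldl (segStep sl) (segs ++ [cur ++ ys], []) := by
  induction ys with
  | nil => intro _ _ _ h; exact absurd rfl h
  | cons y t ih =>
    intro xs segs cur _ hlen
    simp only [List.cons_append, List.foldl_cons, segStep]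
    by_cases ht : t = []
    · subst ht
      rw [if_pos (by simp at hlen ⊢; omega)]
      simp
    · rw [if_neg (by have : t.length > 0 := List.length_pos_iff.mpr ht; simp at hlen ⊢; omega)]
      rw [ih xs segs (cur ++ [y]) ht (by simp at hlen ⊢; omega)]
      simp

-- L3: length of the leftover current_segment is the length modulo the group size.
theorem segFold_rem (sl : Int) (hsl : 0 ≤ sl) (xs : List Int) : ∀ (segs : List (List Int)) (cur : List Int),
    (cur.length : Int) < sl + 1 →
    ((xs.foldl (segStep sl) (segs, cur)).2.length : Int)
      = PySem.Int.mod ((cur.length : Int) + xs.length) (sl + 1) := by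
  induction xs with
  | nil =>
    intro segs cur h
    simp only [List.foldl_nil, List.length_nil, Nat.cast_zero, add_zero]
    rw [PySem.Int.mod_eq_emod_of_pos (by omega),
      Int.emod_eq_of_lt (by positivity) (by simpa using h)]
  | cons x t ih =>
    intro segs cur h
    simp only [List.foldl_cons, segStep]
    by_cases hc : ((cur ++ [x]).length : Int) = sl + 1
    · rw [if_pos hc, ih _ [] (by simp; omega)]
      rw [PySem.Int.mod_eq_emod_of_pos (by omega), PySem.Int.mod_eq_emod_of_pos (by omega)]
      have hx : (cur.length : Int) + ((x :: t).length : Int) = (([] : List Int).length : Int) + ((t.length : Int)) + (sl + 1) * 1 := by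
        simp at hc ⊢; omega
      rw [hx, Int.add_mul_emod_self_left]
    · rw [if_neg hc, ih _ (cur ++ [x]) (by simp at hc ⊢; omega)]
      congr 1
      simp
      omega

-- the segments list A has built when its second loop starts
def segments (sl : Int) (rp : List Int) : List (List Int) :=
  let p := rp.foldl (segStep sl) ([], [])
  if p.2 ≠ [] then p.1 ++ [p.2] else p.1

theorem A_def (ecg : List Int) (rp : List Int) (sl : Int) :
    dynamic_segmentation ecg rp sl =
      if PySem.Int.mod (rp.length : Int) (sl + 1) ≠ 0
      then ((segments sl rp).map (sliceSeg ecg)).dropLast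
      else (segments sl rp).map (sliceSeg ecg) := by
  simp only [dynamic_segmentation, segments, PySem.List.foldl_append_singleton_eq_map,
    PySem.List.slice_to_neg_one, List.nil_append]

theorem segments_base (sl : Int) (rp : List Int)
    (h : (rp.length : Int) < sl + 1) :
    segments sl rp = if rp ≠ [] then [rp] else [] := by
  simp only [segments, segFold_short sl rp [] [] (by simpa using h)]
  simp

theorem segments_step (sl : Int) (hsl : 0 ≤ sl) (rp : List Int)
    (h : (sl + 1 : Int) ≤ rp.length) :
    segments sl rp = rp.take (sl + 1).toNat :: segments sl (rp.drop (sl + 1).toNat) := by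
  have hg : (rp.take (sl + 1).toNat).length = (sl + 1).toNat := by
    simp [List.length_take]; omega
  have htake_ne : rp.take (sl + 1).toNat ≠ [] :=
    List.ne_nil_of_length_pos (by rw [hg]; omega)
  have hclose := segFold_close sl (rp.take (sl + 1).toNat) (rp.drop (sl + 1).toNat) [] []
    htake_ne (by rw [hg]; simp; omega)
  simp only [List.nil_append] at hclose
  rw [List.take_append_drop] at hclose
  simp only [segments]
  rw [hclose, segFold_acc sl (rp.drop (sl + 1).toNat) [rp.take (sl + 1).toNat] []]
  by_cases hF : ((rp.drop (sl + 1).toNat).foldl (segStep sl) ([], [])).2 = [] <;> simp [hF]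

-- A-step: with at least one full group available, A produces its slice and recurses on the rest.
theorem A_step (ecg : List Int) (sl : Int) (hsl : 0 ≤ sl) (rp : List Int)
    (h : (sl + 1 : Int) ≤ rp.length) :
    dynamic_segmentation ecg rp sl
      = sliceSeg ecg (rp.take (sl + 1).toNat) :: dynamic_segmentation ecg (rp.drop (sl + 1).toNat) sl := by
  have hmod : PySem.Int.mod (rp.length : Int) (sl + 1)
      = PySem.Int.mod ((rp.drop (sl + 1).toNat).length : Int) (sl + 1) := by
    rw [PySem.Int.mod_eq_emod_of_pos (by omega), PySem.Int.mod_eq_emod_of_pos (by omega)]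
    have hx : (rp.length : Int) = ((rp.drop (sl + 1).toNat).length : Int) + (sl + 1) * 1 := by
      simp [List.length_drop]; omega
    rw [hx, Int.add_mul_emod_self_left]
  rw [A_def, A_def, segments_step sl hsl rp h, List.map_cons, hmod]
  simp only [List.length_drop]
  by_cases hz : PySem.Int.mod (((rp.length - (sl + 1).toNat : Nat) : Int)) (sl + 1) = 0
  · rw [if_neg (by simpa using hz), if_neg (by simpa using hz)]
  · have hrem : ((segments sl (rp.drop (sl + 1).toNat)).map (sliceSeg ecg)) ≠ [] := by
      have h2 : ((rp.drop (sl + 1).toNat).foldl (segStep sl) ([], [])).2 ≠ [] := by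
        intro hnil
        have h3 := segFold_rem sl hsl (rp.drop (sl + 1).toNat) [] [] (by simp; omega)
        rw [hnil] at h3
        simp [List.length_drop] at h3
        exact hz h3.symm
      simp only [segments, if_pos h2]
      simp
    rw [if_pos hz, if_pos hz, List.dropLast_cons_of_ne_nil hrem]

-- A-base: fewer peaks than a full group yields no segment.
theorem A_base (ecg : List Int) (sl : Int) (hsl : 0 ≤ sl) (rp : List Int)
    (h : (rp.length : Int) < sl + 1) :
    dynamic_segmentation ecg rp sl = [] := by
  rw [A_def, segments_base sl rp h]
  by_cases hrp : rp = []
  · simp [hrp, PySem.Int.mod_eq_emod_of_pos (show (0:Int) < sl + 1 by omega)]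
  · have hlen : (0 : Int) < rp.length := by
      exact_mod_cast List.length_pos_iff.mpr hrp
    have hmod : PySem.Int.mod (rp.length : Int) (sl + 1) ≠ 0 := by
      rw [PySem.Int.mod_eq_emod_of_pos (by omega), Int.emod_eq_of_lt (by omega) h]
      omega
    simp [hrp, hmod]

-- pyGetD at a nonnegative offset past the first (sl+1).toNat elements reads from the dropped tail.
theorem pyGetD_shift (rp : List Int) (S : Nat) (j : Int) (hj : 0 ≤ j) :
    PySem.List.pyGetD rp ((S : Int) + j) 0 = PySem.List.pyGetD (rp.drop S) j 0 := by
  simp only [PySem.List.pyGetD]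
  rw [PySem.List.pyGet?_of_nonneg rp (by omega : (0:Int) ≤ (S:Int) + j),
    PySem.List.pyGet?_of_nonneg (rp.drop S) hj, List.getElem?_drop]
  have hnat : ((S : Int) + j).toNat = S + j.toNat := by omega
  rw [hnat]

-- B-step and B-base: the same recursion for B.
theorem B_step (ecg : List Int) (sl : Int) (hsl : 0 ≤ sl) (rp : List Int)
    (h : (sl + 1 : Int) ≤ rp.length) :
    dynamic_segmentation_alt ecg rp sl
      = sliceSeg ecg (rp.take (sl + 1).toNat) :: dynamic_segmentation_alt ecg (rp.drop (sl + 1).toNat) sl := by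
  have hS : (((sl + 1).toNat : Nat) : Int) = sl + 1 := Int.toNat_of_nonneg (by omega)
  have hn : PySem.Int.floordiv (rp.length : Int) (sl + 1)
      = PySem.Int.floordiv ((rp.drop (sl + 1).toNat).length : Int) (sl + 1) + 1 := by
    rw [PySem.Int.floordiv_eq_ediv_of_pos (by omega), PySem.Int.floordiv_eq_ediv_of_pos (by omega)]
    have hx : (rp.length : Int) = ((rp.drop (sl + 1).toNat).length : Int) + 1 * (sl + 1) := by
      simp [List.length_drop]; omega
    rw [hx, Int.add_mul_ediv_right _ _ (by omega : (sl + 1 : Int) ≠ 0)]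
  have hm0 : 0 ≤ PySem.Int.floordiv ((rp.drop (sl + 1).toNat).length : Int) (sl + 1) := by
    rw [PySem.Int.floordiv_eq_ediv_of_pos (by omega)]
    exact Int.ediv_nonneg (by positivity) (by omega)
  simp only [dynamic_segmentation_alt, hn]
  rw [PySem.List.pyRange_one_cons (by omega), List.map_cons]
  congr 1
  · -- head element = slice of the first complete group
    have h0 : PySem.List.pyGetD (rp.take (sl + 1).toNat) 0 0 = PySem.List.pyGetD rp (0 * (sl + 1)) 0 := by
      rw [zero_mul, PySem.List.pyGetD_zero, PySem.List.pyGetD_zero,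
        List.getD_eq_getElem?_getD, List.getD_eq_getElem?_getD, List.getElem?_take]
      simp [show 0 < (sl + 1).toNat by omega]
    have htake_ne : rp.take (sl + 1).toNat ≠ [] :=
      List.ne_nil_of_length_pos (by simp [List.length_take]; omega)
    have h1 : PySem.List.pyGetD (rp.take (sl + 1).toNat) (-1) 0
        = PySem.List.pyGetD rp (0 * (sl + 1) + (sl + 1) - 1) 0 := by
      rw [PySem.List.pyGetD_neg_one _ 0 htake_ne, List.getLast_eq_getElem,
        List.getElem_take]
      have h2 : (0 : Int) * (sl + 1) + (sl + 1) - 1 = (((sl + 1).toNat - 1 : Nat) : Int) := by omega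
      rw [h2, PySem.List.pyGetD_natCast, List.getD_eq_getElem?_getD,
        List.getElem?_eq_getElem (by omega)]
      simp only [Option.getD_some]
      congr 1
      simp [List.length_take]
      omega
    simp only [sliceSeg, h0, h1]
  · -- remaining elements: shift the stride by one group
    rw [PySem.List.pyRange_one, PySem.List.pyRange_one, List.map_map, List.map_map]
    have hcnt : (PySem.Int.floordiv ((rp.drop (sl + 1).toNat).length : Int) (sl + 1) + 1 - (0 + 1)).toNat
        = (PySem.Int.floordiv ((rp.drop (sl + 1).toNat).length : Int) (sl + 1) - 0).toNat := by omega
    rw [hcnt]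
    refine List.map_congr_left ?_
    intro k _
    simp only [Function.comp_apply]
    have e1 : ((0 : Int) + 1 + k) * (sl + 1) = ((sl + 1).toNat : Int) + (k : Int) * (sl + 1) := by
      rw [hS]; ring
    have e2 : ((0 : Int) + 1 + k) * (sl + 1) + (sl + 1) - 1
        = ((sl + 1).toNat : Int) + ((k : Int) * (sl + 1) + (sl + 1) - 1) := by
      rw [hS]; ring
    rw [e2, e1,
      pyGetD_shift rp _ _ (by have hk := mul_nonneg (Int.natCast_nonneg k) (by omega : (0:Int) ≤ sl + 1); omega),
      pyGetD_shift rp _ _ (by have hk := mul_nonneg (Int.natCast_nonneg k) (by omega : (0:Int) ≤ sl + 1); omega)]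
    rw [zero_add]

theorem B_base (ecg : List Int) (sl : Int) (hsl : 0 ≤ sl) (rp : List Int)
    (h : (rp.length : Int) < sl + 1) :
    dynamic_segmentation_alt ecg rp sl = [] := by
  have hn : PySem.Int.floordiv (rp.length : Int) (sl + 1) = 0 := by
    rw [PySem.Int.floordiv_eq_ediv_of_pos (by omega)]
    exact Int.ediv_eq_zero_of_lt (by positivity) h
  simp [dynamic_segmentation_alt, hn, PySem.List.pyRange_one_eq_nil (by omega : (0:Int) ≤ 0)]

-- with a negative group size the closing condition never fires: everything stays in current_segment
theorem segFold_neg (sl : Int) (hsl : sl + 1 ≤ 0) (xs : List Int) : ∀ (segs : List (List Int)) (cur : List Int),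
    xs.foldl (segStep sl) (segs, cur) = (segs, cur ++ xs) := by
  induction xs with
  | nil => intro segs cur; simp
  | cons x t ih =>
    intro segs cur
    simp only [List.foldl_cons, segStep]
    rw [if_neg (by simp; omega)]
    rw [ih segs (cur ++ [x])]
    simp

-- on the admitted negative segment lengths both programs return the same value
theorem AB_eq_neg (ecg : List Int) (sl : Int) (hsl : sl < -1) (rp : List Int)
    (hnd : rp = [] ∨ ¬ (sl + 1) ∣ (rp.length : Int)) :
    dynamic_segmentation ecg rp sl = dynamic_segmentation_alt ecg rp sl := by
  rw [A_def]
  simp only [segments, segFold_neg sl (by omega) rp [] []]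
  rcases hnd with hnil | hdvd
  · subst hnil
    simp [dynamic_segmentation_alt, PySem.Int.floordiv,
      PySem.List.pyRange_one_eq_nil (by omega : (0:Int) ≤ 0)]
  · have hrp : rp ≠ [] := by
      intro hnil; exact hdvd (by simp [hnil])
    have hmod : PySem.Int.mod (rp.length : Int) (sl + 1) ≠ 0 := fun hz =>
      hdvd ((PySem.Int.mod_eq_zero_iff_dvd _ _).mp hz)
    have hn : PySem.Int.floordiv (rp.length : Int) (sl + 1) ≤ 0 :=
      Int.fdiv_nonpos_of_nonneg_of_nonpos (by positivity) (by omega)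
    simp only [dynamic_segmentation_alt]
    rw [PySem.List.pyRange_one_eq_nil (by omega)]
    simp [hrp, hmod]

theorem AB_eq (ecg : List Int) (sl : Int) (hsl : 0 ≤ sl) (rp : List Int) :
    dynamic_segmentation ecg rp sl = dynamic_segmentation_alt ecg rp sl := by
  by_cases h : (sl + 1 : Int) ≤ rp.length
  · rw [A_step ecg sl hsl rp h, B_step ecg sl hsl rp h]
    have hlt : (rp.drop (sl + 1).toNat).length < rp.length := by
      simp [List.length_drop]; omega
    exact congrArg _ (AB_eq ecg sl hsl (rp.drop (sl + 1).toNat))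
  · rw [A_base ecg sl hsl rp (by omega), B_base ecg sl hsl rp (by omega)]
termination_by rp.length
decreasing_by simp [List.length_drop]; omega

-- ===== VERDICT (by name: the statement is the Claim_ definition above) =====
theorem dynamic_segmentation_spec : Claim_equal_dynamic_segmentation := by
  intro ecg rp sl _ hpre
  obtain ⟨h1, h2⟩ := hpre
  by_cases hsl : 0 ≤ sl
  · exact AB_eq ecg sl hsl rp
  · have hlt : sl < -1 := by omega
    refine AB_eq_neg ecg sl hlt rp ?_
    by_cases hnil : rp = []
    · exact Or.inl hnil
    · exact Or.inr fun hd => h2 ⟨hlt, hnil, hd⟩
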